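-- pv_equiv track=rewrite | github.com/Mapc1/TerrainGeneration | scripts/genLUT.py | writeCont
-- ===== SOURCE A (Python) =====
-- def writeTemperature(tab) -> str:
--     values = list(tab.values())
--     length = len(values)
--
--     string = '\t\t\t\t{'
--     for i in range(length):
--         string += str(values[i][1])
--         if i != length-1:
--             string += ','
--     string += '}'
--
--     return string
--
-- def writeHumidity(tab) -> str:
--     values = list(tab.values())
--     length = len(values)
--
--     string = '\n\t\t\t{\n'
--     for i in range(length):
--         string += writeTemperature(values[i])
--         if i != length-1:
--             string += ','
--     string += '\n\t\t\t}'
--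
--     return string
--
-- def writeErosion(tab) -> str:
--     values = list(tab.values())
--     length = len(values)
--
--     string = '\n\t\t{\n'
--     for i in range(length):
--         string += writeHumidity(values[i])
--         if i != length-1:
--             string += ','
--     string += '\n\t\t}'
--
--     return string
--
-- def writeCont(tab) -> str:
--     values = list(tab.values())
--     length = len(values)
--
--     string = '\n\t{\n'
--     for i in range(length):
--         string += writeErosion(values[i])
--         if i != length-1:
--             string += ','
--     string += '\n\t}'
--
--     return string
-- ===== SOURCE B (Python) =====
-- def writeCont(tab) -> str:
--     OPEN = ('\n\t{\n', '\n\t\t{\n', '\n\t\t\t{\n', '\t\t\t\t{')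
--     CLOSE = ('\n\t}', '\n\t\t}', '\n\t\t\t}', '}')
--     tokens = []
--     stack = [(0, tab)]
--     while stack:
--         top = stack.pop()
--         if isinstance(top, str):
--             tokens.append(top)
--             continue
--         lvl, node = top
--         tokens.append(OPEN[lvl])
--         todo = []
--         for child in node.values():
--             if todo:
--                 todo.append(',')
--             todo.append(str(child[1]) if lvl == 3 else (lvl + 1, child))
--         todo.append(CLOSE[lvl])
--         stack.extend(reversed(todo))
--     return ''.join(tokens)
-- ===== Notes on version B (the rewrite author's own statement) =====
-- stated objective: alternative
-- what changed: A's four mutually-calling per-level formatting functions (each an index loop with trailing-comma bookkeeping) are replaced by a single iterative explicit-stack worklist that emits a flat list of open/close/comma/number tokens in one while loop and joins them once at the end.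
import Mathlib
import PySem

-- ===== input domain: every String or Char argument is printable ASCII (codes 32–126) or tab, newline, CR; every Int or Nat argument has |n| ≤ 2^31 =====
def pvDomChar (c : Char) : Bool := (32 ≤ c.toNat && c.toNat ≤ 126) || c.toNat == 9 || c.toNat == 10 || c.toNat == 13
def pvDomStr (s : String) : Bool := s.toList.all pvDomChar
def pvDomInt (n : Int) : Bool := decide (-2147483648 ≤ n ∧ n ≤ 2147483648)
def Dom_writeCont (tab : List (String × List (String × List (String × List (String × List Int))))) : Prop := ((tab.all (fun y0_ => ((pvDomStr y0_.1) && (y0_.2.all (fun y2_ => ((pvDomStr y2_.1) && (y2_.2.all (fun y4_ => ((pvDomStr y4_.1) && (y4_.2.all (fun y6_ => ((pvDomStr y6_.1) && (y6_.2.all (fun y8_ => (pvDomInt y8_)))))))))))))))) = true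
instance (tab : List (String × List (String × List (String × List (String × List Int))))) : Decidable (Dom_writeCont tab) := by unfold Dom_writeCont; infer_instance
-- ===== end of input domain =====

-- B replaces A's four nested recursive formatting functions by an iterative explicit-stack
-- worklist that emits a flat token list (open/close/comma/number tokens) in one loop and
-- then joins the tokens once (objective: alternative decomposition; same cost).

-- ===== PORT A =====
-- literal port of writeTemperature: loop over range(len(values)); values[i][1] is
-- pyGetD with default (Pre_ guarantees the index is in range, so the default is never used)
def writeTemperature (tab : List (String × List Int)) : String :=
  let values := tab.map Prod.snd
  let length : Int := (values.length : Int)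
  let string := "\t\t\t\t{"
  let string := (PySem.List.pyRange 0 length 1).foldl
    (fun string i =>
      if i ≠ length - 1 then
        (string ++ PySem.Int.toStr (PySem.List.pyGetD (PySem.List.pyGetD values i []) 1 0)) ++ ","
      else
        string ++ PySem.Int.toStr (PySem.List.pyGetD (PySem.List.pyGetD values i []) 1 0)) string
  string ++ "}"

def writeHumidity (tab : List (String × List (String × List Int))) : String :=
  let values := tab.map Prod.snd
  let length : Int := (values.length : Int)
  let string := "\n\t\t\t{\n"
  let string := (PySem.List.pyRange 0 length 1).foldl
    (fun string i =>
      if i ≠ length - 1 then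
        (string ++ writeTemperature (PySem.List.pyGetD values i [])) ++ ","
      else
        string ++ writeTemperature (PySem.List.pyGetD values i [])) string
  string ++ "\n\t\t\t}"

def writeErosion (tab : List (String × List (String × List (String × List Int)))) : String :=
  let values := tab.map Prod.snd
  let length : Int := (values.length : Int)
  let string := "\n\t\t{\n"
  let string := (PySem.List.pyRange 0 length 1).foldl
    (fun string i =>
      if i ≠ length - 1 then
        (string ++ writeHumidity (PySem.List.pyGetD values i [])) ++ ","
      else
        string ++ writeHumidity (PySem.List.pyGetD values i [])) string
  string ++ "\n\t\t}"

def writeCont (tab : List (String × List (String × List (String × List (String × List Int))))) : String :=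
  let values := tab.map Prod.snd
  let length : Int := (values.length : Int)
  let string := "\n\t{\n"
  let string := (PySem.List.pyRange 0 length 1).foldl
    (fun string i =>
      if i ≠ length - 1 then
        (string ++ writeErosion (PySem.List.pyGetD values i [])) ++ ","
      else
        string ++ writeErosion (PySem.List.pyGetD values i [])) string
  string ++ "\n\t}"

-- ===== PORT B =====
-- Source B's stack holds either a pending (lvl, node) pair or a ready string token; Python's
-- dynamically-typed stack entries become one frame type with a constructor per level.
inductive PvFrame : Type where
  | text  : String → PvFrame
  | node0 : List (String × List (String × List (String × List (String × List Int)))) → PvFrame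
  | node1 : List (String × List (String × List (String × List Int))) → PvFrame
  | node2 : List (String × List (String × List Int)) → PvFrame
  | node3 : List (String × List Int) → PvFrame

-- Source B's inner "for child in node.values(): if todo: todo.append(','); todo.append(item)"
def pvMkTodo {α : Type} (f : α → PvFrame) (cs : List α) : List PvFrame :=
  cs.foldl (fun td c => (if td.length > 0 then td ++ [PvFrame.text ","] else td) ++ [f c]) []

-- weights for termination of the worklist loop (proof artefact, not part of Source B)
def pvW3 (_ : List (String × List Int)) : Nat := 1
def pvW2 (t : List (String × List (String × List Int))) : Nat := 1 + (t.map (fun c => pvW3 c.2)).sum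
def pvW1 (t : List (String × List (String × List (String × List Int)))) : Nat := 1 + (t.map (fun c => pvW2 c.2)).sum
def pvW0 (t : List (String × List (String × List (String × List (String × List Int))))) : Nat := 1 + (t.map (fun c => pvW1 c.2)).sum
def pvW : PvFrame → Nat
  | .text _ => 0
  | .node0 t => pvW0 t
  | .node1 t => pvW1 t
  | .node2 t => pvW2 t
  | .node3 t => pvW3 t
def pvSW (s : List PvFrame) : Nat := (s.map pvW).sum

theorem pvSW_append (a b : List PvFrame) : pvSW (a ++ b) = pvSW a + pvSW b := by
  simp [pvSW]

theorem pvSW_mkTodo {α : Type} (f : α → PvFrame) (w : α → Nat)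
    (h : ∀ c, pvW (f c) = w c) (cs : List α) :
    pvSW (pvMkTodo f cs) = (cs.map w).sum := by
  suffices H : ∀ td, pvSW (cs.foldl (fun td c => (if td.length > 0 then td ++ [PvFrame.text ","] else td) ++ [f c]) td) = pvSW td + (cs.map w).sum by
    simpa [pvMkTodo, pvSW] using H []
  induction cs with
  | nil => intro td; simp
  | cons c cs ih =>
      intro td
      rw [List.foldl_cons, ih]
      have hfc : pvSW [f c] = w c := by simp [pvSW, h c]
      split_ifs
      · rw [pvSW_append, pvSW_append, hfc]
        have h0 : pvSW [PvFrame.text ","] = 0 := rfl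
        rw [h0]; simp; omega
      · rw [pvSW_append, hfc]; simp; omega

theorem pvSumZero {β : Type} (l : List β) : (l.map (fun _ => (0 : Nat))).sum = 0 := by
  induction l with
  | nil => rfl
  | cons a l ih => simp [ih]

-- the worklist loop of Source B: pop a frame; a string token goes to `tokens`, a (lvl,node)
-- frame emits its open token and pushes its todo list (children + commas + close token)
def pvRun : List PvFrame → List String → List String
  | [], tokens => tokens
  | .text s :: rest, tokens => pvRun rest (tokens ++ [s])
  | .node0 t :: rest, tokens =>
      pvRun ((pvMkTodo PvFrame.node1 (t.map Prod.snd) ++ [PvFrame.text "\n\t}"]) ++ rest)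
        (tokens ++ ["\n\t{\n"])
  | .node1 t :: rest, tokens =>
      pvRun ((pvMkTodo PvFrame.node2 (t.map Prod.snd) ++ [PvFrame.text "\n\t\t}"]) ++ rest)
        (tokens ++ ["\n\t\t{\n"])
  | .node2 t :: rest, tokens =>
      pvRun ((pvMkTodo PvFrame.node3 (t.map Prod.snd) ++ [PvFrame.text "\n\t\t\t}"]) ++ rest)
        (tokens ++ ["\n\t\t\t{\n"])
  | .node3 t :: rest, tokens =>
      pvRun ((pvMkTodo (fun c => PvFrame.text (PySem.Int.toStr (PySem.List.pyGetD c 1 0))) (t.map Prod.snd)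
              ++ [PvFrame.text "}"]) ++ rest)
        (tokens ++ ["\t\t\t\t{"])
  termination_by s _ => (pvSW s, s.length)
  decreasing_by
  · have h : pvSW (PvFrame.text s :: rest) = pvSW rest := by simp [pvSW, pvW]
    rw [h]
    exact Prod.Lex.right _ (by simp)
  · apply Prod.Lex.left
    rw [pvSW_append, pvSW_append, pvSW_mkTodo PvFrame.node1 pvW1 (fun c => rfl)]
    simp only [pvSW, pvW, pvW0, List.map_cons, List.sum_cons, List.map_map,
      Function.comp_def, List.attach_map_val]
    simp
    try omega
  · apply Prod.Lex.left
    rw [pvSW_append, pvSW_append, pvSW_mkTodo PvFrame.node2 pvW2 (fun c => rfl)]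
    simp only [pvSW, pvW, pvW1, List.map_cons, List.sum_cons, List.map_map,
      Function.comp_def, List.attach_map_val]
    simp
    try omega
  · apply Prod.Lex.left
    rw [pvSW_append, pvSW_append, pvSW_mkTodo PvFrame.node3 pvW3 (fun c => rfl)]
    simp only [pvSW, pvW, pvW2, List.map_cons, List.sum_cons, List.map_map,
      Function.comp_def, List.attach_map_val]
    simp
    try omega
  · apply Prod.Lex.left
    rw [pvSW_append, pvSW_append, pvSW_mkTodo _ (fun _ => 0) (fun c => rfl), pvSumZero]
    simp only [pvSW, pvW, pvW3, List.map_cons, List.sum_cons]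
    simp
    try omega

def writeCont_alt (tab : List (String × List (String × List (String × List (String × List Int))))) : String :=
  PySem.Str.join "" (pvRun [PvFrame.node0 tab] [])

-- ===== PRECONDITION & SPEC =====
-- Pre_ excludes inputs where some innermost value list has fewer than 2 elements:
-- there Python A raises IndexError on values[i][1] (and B raises identically).
def Pre_writeCont (tab : List (String × List (String × List (String × List (String × List Int))))) : Prop :=
  ∀ a ∈ tab, ∀ b ∈ a.2, ∀ c ∈ b.2, ∀ d ∈ c.2, 2 ≤ d.2.length

instance (tab : List (String × List (String × List (String × List (String × List Int))))) : Decidable (Pre_writeCont tab) := by unfold Pre_writeCont; infer_instance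

def pvWitness_writeCont : (List (String × List (String × List (String × List (String × List Int))))) :=
  [("a", [("b", [("c", [("d", [1, 2])])])])]

def Spec_writeCont (tab : List (String × List (String × List (String × List (String × List Int))))) (out : String) : Prop := out = writeCont_alt tab
instance (tab : List (String × List (String × List (String × List (String × List Int))))) (out : String) : Decidable (Spec_writeCont tab out) := by unfold Spec_writeCont; infer_instance

-- ===== CLAIM (what is proved, stated in full; the proofs are below) =====
def Claim_equal_writeCont : Prop := ∀ (tab : List (String × List (String × List (String × List (String × List Int))))), Dom_writeCont tab → Pre_writeCont tab → Spec_writeCont tab (writeCont tab)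

-- ===== LEMMAS AND PROOFS =====

-- a += loop over a list is the prefix ++ the concatenation of the pieces
theorem pvFoldlStrAppend (L : List String) (a : String) :
    L.foldl (· ++ ·) a = a ++ L.foldl (· ++ ·) "" := by
  induction L generalizing a with
  | nil => simp
  | cons b L ih => rw [List.foldl_cons, List.foldl_cons, ih (a ++ b), ih ("" ++ b)]
                   simp [String.append_assoc]

theorem pvStrJoinNil (sep : String) : PySem.Str.join sep [] = "" := rfl

theorem pvStrJoinSingleton (sep x : String) : PySem.Str.join sep [x] = x := by
  simp [PySem.Str.join, PySem.Chars.join, List.intercalate, String.ofList_toList]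

theorem pvStrJoinConsCons (sep p q : String) (rest : List String) :
    PySem.Str.join sep (p :: q :: rest) = p ++ sep ++ PySem.Str.join sep (q :: rest) := by
  simp [PySem.Str.join, PySem.Chars.join_cons_cons, String.ofList_append, String.append_assoc]

-- ','.join over a snoc: the join of the front, a comma, then the last element
theorem pvJoinSnoc (l : List String) (y : String) (hl : l ≠ []) :
    PySem.Str.join "," (l ++ [y]) = PySem.Str.join "," l ++ "," ++ y := by
  induction l with
  | nil => exact absurd rfl hl
  | cons a l ih =>
      cases l with
      | nil => simp [pvStrJoinConsCons, pvStrJoinSingleton]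
      | cons b t =>
          rw [List.cons_append, List.cons_append, pvStrJoinConsCons, ← List.cons_append,
              ih (by simp), pvStrJoinConsCons]
          simp [String.append_assoc]

-- String.join unfolds one cons at a time
theorem pvStringJoinCons (x : String) (l : List String) :
    String.join (x :: l) = x ++ String.join l := by
  simp only [String.join, List.foldl_cons]
  rw [pvFoldlStrAppend l ("" ++ x)]
  simp [String.append_assoc]

theorem pvStringJoinNilLem : String.join ([] : List String) = "" := rfl

-- "".join is plain concatenation
theorem pvJoinEmptySep (l : List String) : PySem.Str.join "" l = String.join l := by
  induction l with
  | nil => rfl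
  | cons a l ih =>
      cases l with
      | nil => simp [pvStrJoinSingleton, String.join]
      | cons b t =>
          rw [pvStrJoinConsCons, ih]
          simp [pvStringJoinCons, String.append_assoc]

theorem pvStringJoinAppend (a b : List String) :
    String.join (a ++ b) = String.join a ++ String.join b := by
  induction a with
  | nil => simp [String.join]
  | cons x a ih =>
      rw [List.cons_append, pvStringJoinCons, pvStringJoinCons, ih, String.append_assoc]

theorem pvFoldlAppend {α : Type} (g : α → String) (vs : List α) (s : String) :
    vs.foldl (fun acc x => acc ++ g x) s = s ++ String.join (vs.map g) := by
  induction vs generalizing s with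
  | nil => simp [String.join]
  | cons x xs ih => simp only [String.join, List.map_cons, List.foldl_cons, ih]
                    rw [pvFoldlStrAppend _ ("" ++ g x)]
                    simp [String.append_assoc]

-- ','.join of l ++ [y]: every element of l gets a trailing comma, y closes
theorem pvJoinAppendSingleton (l : List String) (y : String) :
    PySem.Str.join "," (l ++ [y]) = String.join (l.map (fun z => z ++ ",")) ++ y := by
  induction l with
  | nil => simp [pvStrJoinSingleton, String.join]
  | cons a l ih =>
      have h : ∃ b t, l ++ [y] = b :: t := by cases l <;> exact ⟨_, _, rfl⟩
      obtain ⟨b, t, hbt⟩ := h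
      calc PySem.Str.join "," ((a :: l) ++ [y])
          = a ++ "," ++ PySem.Str.join "," (l ++ [y]) := by
            rw [List.cons_append, hbt, pvStrJoinConsCons, ← hbt]
        _ = String.join ((a :: l).map (fun z => z ++ ",")) ++ y := by
            rw [ih, List.map_cons, pvStringJoinCons]
            simp [String.append_assoc]

-- pyGetD into the left part of an append
theorem pvPyGetDAppendLeft {α : Type} (xs : List α) (x : α) (d : α) (i : Int)
    (h0 : 0 ≤ i) (h1 : i < (xs.length : Int)) :
    PySem.List.pyGetD (xs ++ [x]) i d = PySem.List.pyGetD xs i d := by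
  rw [PySem.List.pyGetD_eq_getElem (xs ++ [x]) d h0 (by simp; omega),
      PySem.List.pyGetD_eq_getElem xs d h0 h1]
  exact List.getElem_append_left (by omega)

-- A's comma-bookkeeping loop over range(len(vs)) IS prefix-join with ','
theorem pvLoopEqJoin {α : Type} (f : α → String) (d : α) (vs : List α) (s : String) :
    (PySem.List.pyRange 0 (vs.length : Int) 1).foldl
      (fun acc i =>
        if i ≠ (vs.length : Int) - 1 then (acc ++ f (PySem.List.pyGetD vs i d)) ++ ","
        else acc ++ f (PySem.List.pyGetD vs i d)) s
    = s ++ PySem.Str.join "," (vs.map f) := by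
  induction vs using List.reverseRecOn generalizing s with
  | nil => simp [PySem.List.pyRange_one_eq_nil, pvStrJoinNil]
  | append_singleton xs x ih =>
      have hlen : ((xs ++ [x]).length : Int) = (xs.length : Int) + 1 := by
        simp
      rw [hlen, PySem.List.pyRange_one_succ_right (by positivity), List.foldl_append]
      have hmid : (PySem.List.pyRange 0 (xs.length : Int) 1).foldl
          (fun acc i =>
            if i ≠ (xs.length : Int) + 1 - 1 then (acc ++ f (PySem.List.pyGetD (xs ++ [x]) i d)) ++ ","
            else acc ++ f (PySem.List.pyGetD (xs ++ [x]) i d)) s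
          = xs.foldl (fun acc y => (acc ++ f y) ++ ",") s := by
        rw [PySem.List.foldl_congr_mem _ _
              (fun acc i => (acc ++ f (PySem.List.pyGetD xs i d)) ++ ",") s ?_]
        · exact PySem.List.foldl_pyRange_zero_pyGetD xs d
            (fun acc y => (acc ++ f y) ++ ",") s
        · intro acc i hi
          rw [PySem.List.mem_pyRange_one] at hi
          rw [if_pos (by omega), pvPyGetDAppendLeft xs x d i hi.1 hi.2]
      rw [hmid]
      have hlast : PySem.List.pyGetD (xs ++ [x]) (xs.length : Int) d = x := by
        rw [PySem.List.pyGetD_eq_getElem (xs ++ [x]) d (by positivity) (by simp)]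
        simp
      simp only [List.foldl_cons, List.foldl_nil, hlast,
        if_neg (by omega : ¬ ((xs.length : Int) ≠ (xs.length : Int) + 1 - 1))]
      have hfold : xs.foldl (fun acc y => (acc ++ f y) ++ ",") s
          = s ++ String.join (xs.map (fun y => f y ++ ",")) := by
        rw [PySem.List.foldl_congr_mem xs _ (fun acc y => acc ++ (f y ++ ",")) s
              (by intro acc y _; rw [String.append_assoc])]
        exact pvFoldlAppend (fun y => f y ++ ",") xs s
      rw [hfold, List.map_append, List.map_singleton, pvJoinAppendSingleton,
          List.map_map]
      simp [String.append_assoc, Function.comp_def]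

-- the value each frame contributes to the final output
def pvRender : PvFrame → String
  | .text s => s
  | .node0 t => writeCont t
  | .node1 t => writeErosion t
  | .node2 t => writeHumidity t
  | .node3 t => writeTemperature t

theorem pvMkTodoStep_ne_nil {α : Type} (f : α → PvFrame) (cs : List α) :
    ∀ (td : List PvFrame), td ≠ [] →
      cs.foldl (fun td c => (if td.length > 0 then td ++ [PvFrame.text ","] else td) ++ [f c]) td ≠ [] := by
  induction cs with
  | nil => intro td h; simp only [List.foldl_nil]; exact h
  | cons c cs ih =>
      intro td h
      rw [List.foldl_cons]
      exact ih _ (List.append_ne_nil_of_right_ne_nil _ (List.cons_ne_nil _ _))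

-- joining the rendered todo list built by pvMkTodo gives ','.join of the rendered children
theorem pvJoinMkTodo {α : Type} (f : α → PvFrame) (cs : List α) :
    String.join ((pvMkTodo f cs).map pvRender)
      = PySem.Str.join "," (cs.map (fun c => pvRender (f c))) := by
  induction cs using List.reverseRecOn with
  | nil => simp [pvMkTodo, String.join, pvStrJoinNil]
  | append_singleton xs x ih =>
      rw [pvMkTodo, List.foldl_append, ← pvMkTodo]
      cases xs with
      | nil => simp [pvMkTodo, String.join, pvStrJoinSingleton]
      | cons a t =>
          have hne : pvMkTodo f (a :: t) ≠ [] := by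
            rw [pvMkTodo, List.foldl_cons]
            exact pvMkTodoStep_ne_nil f t _ (List.append_ne_nil_of_right_ne_nil _ (List.cons_ne_nil _ _))
          simp only [List.foldl_cons, List.foldl_nil]
          rw [if_pos (by cases h : pvMkTodo f (a :: t) with
                         | nil => exact absurd h hne
                         | cons _ _ => simp [h]),
              List.map_append, List.map_append, pvStringJoinAppend, pvStringJoinAppend, ih]
          simp only [List.map_singleton, List.map_cons, List.map_nil, List.map_append, ← List.cons_append]
          rw [pvJoinSnoc _ _ (by simp)]
          simp [String.join, pvRender, pvStringJoinCons, String.append_assoc]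

-- characterizations of A's four functions as open ++ ','.join ++ close
theorem pvTempChar (t : List (String × List Int)) :
    writeTemperature t = "\t\t\t\t{" ++ PySem.Str.join ","
      ((t.map Prod.snd).map (fun v => PySem.Int.toStr (PySem.List.pyGetD v 1 0))) ++ "}" := by
  simp only [writeTemperature]
  rw [pvLoopEqJoin (fun v => PySem.Int.toStr (PySem.List.pyGetD v 1 0)) [] (t.map Prod.snd)]

theorem pvHumChar (t : List (String × List (String × List Int))) :
    writeHumidity t = "\n\t\t\t{\n" ++ PySem.Str.join ","
      ((t.map Prod.snd).map writeTemperature) ++ "\n\t\t\t}" := by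
  simp only [writeHumidity]
  rw [pvLoopEqJoin writeTemperature [] (t.map Prod.snd)]

theorem pvEroChar (t : List (String × List (String × List (String × List Int)))) :
    writeErosion t = "\n\t\t{\n" ++ PySem.Str.join ","
      ((t.map Prod.snd).map writeHumidity) ++ "\n\t\t}" := by
  simp only [writeErosion]
  rw [pvLoopEqJoin writeHumidity [] (t.map Prod.snd)]

theorem pvContChar (t : List (String × List (String × List (String × List (String × List Int))))) :
    writeCont t = "\n\t{\n" ++ PySem.Str.join ","
      ((t.map Prod.snd).map writeErosion) ++ "\n\t}" := by
  simp only [writeCont]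
  rw [pvLoopEqJoin writeErosion [] (t.map Prod.snd)]

-- loop invariant: the joined output of pvRun is the tokens so far plus each frame's rendering
theorem pvRunJoin (s : List PvFrame) (tokens : List String) :
    String.join (pvRun s tokens) = String.join tokens ++ String.join (s.map pvRender) := by
  induction s, tokens using pvRun.induct with
  | case1 tokens => simp [pvRun, String.join]
  | case2 s rest tokens ih =>
      rw [pvRun, ih, pvStringJoinAppend]
      simp [pvRender, pvStringJoinCons, pvStringJoinNilLem, String.append_assoc]
  | case3 t rest tokens ih =>
      simp only [List.map_map, Function.comp_def, List.attach_map_val] at ih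
      rw [pvRun, ih]
      simp only [List.map_append, List.map_cons, List.map_map, Function.comp_def,
        pvStringJoinAppend, pvJoinMkTodo]
      simp [pvRender, pvStringJoinCons, pvStringJoinNilLem, Function.comp_def,
        pvContChar, String.append_assoc]
  | case4 t rest tokens ih =>
      simp only [List.map_map, Function.comp_def, List.attach_map_val] at ih
      rw [pvRun, ih]
      simp only [List.map_append, List.map_cons, List.map_map, Function.comp_def,
        pvStringJoinAppend, pvJoinMkTodo]
      simp [pvRender, pvStringJoinCons, pvStringJoinNilLem, Function.comp_def,
        pvEroChar, String.append_assoc]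
  | case5 t rest tokens ih =>
      simp only [List.map_map, Function.comp_def, List.attach_map_val] at ih
      rw [pvRun, ih]
      simp only [List.map_append, List.map_cons, List.map_map, Function.comp_def,
        pvStringJoinAppend, pvJoinMkTodo]
      simp [pvRender, pvStringJoinCons, pvStringJoinNilLem, Function.comp_def,
        pvHumChar, String.append_assoc]
  | case6 t rest tokens ih =>
      simp only [List.map_map, Function.comp_def, List.attach_map_val] at ih
      rw [pvRun, ih]
      simp only [List.map_append, List.map_cons, List.map_map, Function.comp_def,
        pvStringJoinAppend, pvJoinMkTodo]
      simp [pvRender, pvStringJoinCons, pvStringJoinNilLem, Function.comp_def,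
        pvTempChar, String.append_assoc]

-- ===== VERDICT (by name: the statement is the Claim_ definition above) =====
theorem writeCont_spec : Claim_equal_writeCont := by
  intro tab _ _
  simp only [Spec_writeCont, writeCont_alt, pvJoinEmptySep, pvRunJoin]
  simp [pvRender, pvStringJoinCons, pvStringJoinNilLem]
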